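-- pv_equiv track=rewrite | github.com/kang36897/investment_strategy | permutation.py | partner
-- ===== SOURCE A (Python) =====
-- def partner(existing_teams, newbie, objectives):
--     p = []
--
--     for team in existing_teams:
--         fixed_groups = []
--         for i in range(len(team)):
--             group = team[i]
--             if len(group) >= 2:
--                 if ','.join(group) in objectives:
--                     fixed_groups.append(group)
--                 else:
--                     break
--                 continue
--
--             else:
--                 t = [newbie]
--                 t.extend(group)
--                 n_group = sorted(t)
--                 if ','.join(n_group) in objectives:
--                     n_team = []
--                     n_team.extend(fixed_groups)
--                     n_team.append(n_group)
--                     n_team.extend(team[(i + 1):])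
--                     p.append(n_team)
--
--                 fixed_groups.append(group)
--     return p
-- ===== SOURCE B (Python) =====
-- def partner(existing_teams, newbie, objectives):
--     def options(team):
--         # all completions of this suffix: each emitted value is the suffix with
--         # exactly one singleton group (before any invalid multi-group) replaced
--         # by the sorted merge with the newbie
--         if not team:
--             return []
--         g, rest = team[0], team[1:]
--         if len(g) >= 2:
--             if ','.join(g) in objectives:
--                 return [[g] + t for t in options(rest)]
--             return []
--         n = sorted([newbie] + g)
--         here = [[n] + rest] if ','.join(n) in objectives else []
--         return here + [[g] + t for t in options(rest)]
--
--     out = []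
--     for team in existing_teams:
--         out.extend(options(team))
--     return out
-- ===== Notes on version B (the rewrite author's own statement) =====
-- stated objective: alternative
-- what changed: B replaces A's index loop with fixed_groups accumulator and break by a structural recursion over each team's suffix that returns all completed variant teams, building every emitted team back-to-front by consing the current head onto the recursive results.
import Mathlib
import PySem

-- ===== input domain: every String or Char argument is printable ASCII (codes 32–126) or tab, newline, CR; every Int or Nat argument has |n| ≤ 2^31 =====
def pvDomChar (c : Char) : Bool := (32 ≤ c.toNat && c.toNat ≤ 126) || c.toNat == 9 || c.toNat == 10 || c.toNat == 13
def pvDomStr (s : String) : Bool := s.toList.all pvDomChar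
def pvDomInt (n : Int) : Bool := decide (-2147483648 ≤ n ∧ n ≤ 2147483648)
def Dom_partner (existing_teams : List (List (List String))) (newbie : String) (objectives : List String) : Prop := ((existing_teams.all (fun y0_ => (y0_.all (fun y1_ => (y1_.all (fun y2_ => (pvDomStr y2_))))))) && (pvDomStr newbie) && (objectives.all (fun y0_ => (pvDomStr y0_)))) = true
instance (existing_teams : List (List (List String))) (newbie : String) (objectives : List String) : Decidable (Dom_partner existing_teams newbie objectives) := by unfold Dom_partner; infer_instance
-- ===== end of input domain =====

-- B replaces A's index loop + fixed_groups accumulator + break by a structural recursion returning all variant teams, each built by consing the head onto the recursive results (same cost; different decomposition).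

-- ===== PORT A =====
-- A's inner for-i-with-break, as structural recursion on the remaining suffix of team:
-- `rest` is team[i:], `fixed` is the fixed_groups accumulator, `p` the output accumulator;
-- team[(i+1):] is the tail `rest` after the head group is taken off.
def partnerTeamA (newbie : String) (objectives : List String) :
    List (List String) → List (List String) → List (List (List String)) → List (List (List String))
  | [], _, p => p
  | group :: rest, fixed, p =>
    if 2 ≤ group.length then
      if PySem.Str.join "," group ∈ objectives then
        partnerTeamA newbie objectives rest (fixed ++ [group]) p
      else p  -- break
    else
      -- t = [newbie]; t.extend(group); n_group = sorted(t)
      let n_group := PySem.List.sorted (newbie :: group) (fun x => x) false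
      let p' := if PySem.Str.join "," n_group ∈ objectives then
          p ++ [fixed ++ [n_group] ++ rest] else p
      partnerTeamA newbie objectives rest (fixed ++ [group]) p'

def partner (existing_teams : List (List (List String))) (newbie : String) (objectives : List String) : List (List (List String)) :=
  existing_teams.foldl (fun p team => partnerTeamA newbie objectives team [] p) []

-- ===== PORT B =====
-- options(team): all completions of the suffix, each variant team built by consing the head group
def optionsB (newbie : String) (objectives : List String) : List (List String) → List (List (List String))
  | [] => []
  | g :: rest =>
    if 2 ≤ g.length then
      if PySem.Str.join "," g ∈ objectives then
        (optionsB newbie objectives rest).map (fun t => g :: t)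
      else []
    else
      let n := PySem.List.sorted (newbie :: g) (fun x => x) false
      (if PySem.Str.join "," n ∈ objectives then [n :: rest] else [])
        ++ (optionsB newbie objectives rest).map (fun t => g :: t)

def partner_alt (existing_teams : List (List (List String))) (newbie : String) (objectives : List String) : List (List (List String)) :=
  existing_teams.foldl (fun out team => out ++ optionsB newbie objectives team) []

-- ===== PRECONDITION & SPEC =====
def Spec_partner (existing_teams : List (List (List String))) (newbie : String) (objectives : List String) (out : List (List (List String))) : Prop := out = partner_alt existing_teams newbie objectives
instance (existing_teams : List (List (List String))) (newbie : String) (objectives : List String) (out : List (List (List String))) : Decidable (Spec_partner existing_teams newbie objectives out) := by unfold Spec_partner; infer_instance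

-- ===== CLAIM (what is proved, stated in full; the proofs are below) =====
def Claim_equal_partner : Prop := ∀ (existing_teams : List (List (List String))) (newbie : String) (objectives : List String), Dom_partner existing_teams newbie objectives → Spec_partner existing_teams newbie objectives (partner existing_teams newbie objectives)

-- ===== LEMMAS AND PROOFS =====

-- A's team loop, flushed: the accumulator `fixed` becomes a prefix of every emission.
theorem partnerTeamA_eq (newbie : String) (objectives : List String) :
    ∀ (rest fixed : List (List String)) (p : List (List (List String))),
      partnerTeamA newbie objectives rest fixed p
        = p ++ (optionsB newbie objectives rest).map (fun t => fixed ++ t) := by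
  intro rest
  induction rest with
  | nil => intro fixed p; simp [partnerTeamA, optionsB]
  | cons g rest ih =>
    intro fixed p
    simp only [partnerTeamA, optionsB]
    split_ifs with h1 h2 h3 <;>
      simp [ih, List.append_assoc, Function.comp_def]

-- ===== VERDICT (by name: the statement is the Claim_ definition above) =====
theorem partner_spec : Claim_equal_partner := by
  intro existing_teams newbie objectives hd
  clear hd
  unfold Spec_partner partner partner_alt
  suffices h : ∀ p, existing_teams.foldl (fun p team => partnerTeamA newbie objectives team [] p) p
      = existing_teams.foldl (fun out team => out ++ optionsB newbie objectives team) p from h []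
  induction existing_teams with
  | nil => intro p; rfl
  | cons team teams ih =>
    intro p
    simp only [List.foldl_cons]
    rw [partnerTeamA_eq, ih]
    simp
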